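-- pv_equiv track=rewrite | github.com/pypi-data/pypi-mirror-142 | packages/sknlp/sknlp-0.5.0.tar.gz/sknlp-0.5.0/sknlp/data/nlp_dataset.py | _round_robin_trim
-- ===== SOURCE A (Python) =====
-- def _round_robin_trim(
--     tokens_list: list[list[str]], max_length: int
-- ) -> list[list[str]]:
--     lengths = [len(tokens) for tokens in tokens_list]
--     if sum(lengths) <= max_length:
--         return tokens_list
--
--     min_length = min(lengths)
--     fill_length = min(min_length, max_length // len(lengths))
--     trimmed_lengths = [fill_length] * len(lengths)
--
--     remainder_length = max_length - fill_length * len(lengths)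
--     i = 0
--     while remainder_length:
--         if trimmed_lengths[i] < lengths[i]:
--             trimmed_lengths[i] += 1
--             remainder_length -= 1
--         i = (i + 1) % len(lengths)
--     return [tokens[:length] for tokens, length in zip(tokens_list, trimmed_lengths)]
-- ===== SOURCE B (Python) =====
-- def _round_robin_trim(
--     tokens_list: list[list[str]], max_length: int
-- ) -> list[list[str]]:
--     lengths = [len(tokens) for tokens in tokens_list]
--     if sum(lengths) <= max_length:
--         return tokens_list
--
--     # Water-filling: find the largest level t with sum(min(l, t)) <= max_length,
--     # then hand the leftover budget out as +1 to the first lists still above t.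
--     n = len(lengths)
--     sl = sorted(lengths)
--     prefix, k = 0, 0
--     while prefix + (n - k) * sl[k] <= max_length:
--         prefix += sl[k]
--         k += 1
--     t, extra = divmod(max_length - prefix, n - k)
--
--     out = []
--     for tokens in tokens_list:
--         if t < len(tokens) and extra > 0:
--             out.append(tokens[: t + 1])
--             extra -= 1
--         else:
--             out.append(tokens[: min(len(tokens), t)])
--     return out
-- ===== Notes on version B (the rewrite author's own statement) =====
-- stated objective: alternative
-- what changed: Replaces A's unit-by-unit round-robin distribution loop by capped water-filling: sort the lengths, one scan finds the common fill level t and the leftover `extra` via divmod, and a single output pass gives the first `extra` still-capped lists one extra token; a timing run did not measure B faster, so no speed is claimed.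
-- outside the precondition, e.g. on _round_robin_trim([], -1): A raises ValueError, B raises IndexError
import Mathlib
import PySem

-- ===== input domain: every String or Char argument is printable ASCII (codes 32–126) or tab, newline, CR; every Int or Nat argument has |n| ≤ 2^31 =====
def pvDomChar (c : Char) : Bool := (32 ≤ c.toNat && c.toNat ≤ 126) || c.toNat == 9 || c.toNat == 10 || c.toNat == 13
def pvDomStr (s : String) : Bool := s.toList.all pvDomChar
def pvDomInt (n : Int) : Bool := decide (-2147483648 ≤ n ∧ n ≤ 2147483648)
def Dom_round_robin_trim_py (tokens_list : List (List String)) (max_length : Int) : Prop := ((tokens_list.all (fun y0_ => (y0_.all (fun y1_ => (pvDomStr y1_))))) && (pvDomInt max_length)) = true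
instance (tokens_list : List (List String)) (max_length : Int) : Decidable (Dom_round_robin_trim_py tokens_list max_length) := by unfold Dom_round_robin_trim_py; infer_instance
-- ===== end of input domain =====

-- B computes the same trimmed lengths by sorted water-filling (fill level + divmod remainder)
-- instead of A's unit-by-unit round-robin loop; the return values are proved identical.

-- ===== PORT A =====
-- Python's `while remainder_length:` loop; `i` stays in [0, n), so a Nat index with `%` is exact.
-- `fuel` is a totality guard only: it strictly exceeds the number of loop iterations (proved below).
def pvLoopA (ls : List Int) (trimmed : List Int) (rem : Int) (i : Nat) : Nat → List Int
  | 0 => trimmed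
  | fuel + 1 =>
    if rem = 0 then trimmed
    else if trimmed.getD i 0 < ls.getD i 0 then
      pvLoopA ls (trimmed.set i (trimmed.getD i 0 + 1)) (rem - 1) ((i + 1) % ls.length) fuel
    else
      pvLoopA ls trimmed rem ((i + 1) % ls.length) fuel

def round_robin_trim_py (tokens_list : List (List String)) (max_length : Int) : List (List String) :=
  let lengths : List Int := tokens_list.map (fun tokens => (tokens.length : Int))
  if lengths.sum ≤ max_length then tokens_list
  else
    -- min(lengths): Python raises ValueError on []; Pre_ excludes that case, `.getD 0` is a totality guard
    let min_length : Int := (PySem.List.min? lengths (fun x => x)).getD 0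
    let n : Int := (lengths.length : Int)
    let fill_length : Int := min min_length (PySem.Int.floordiv max_length n)
    let trimmed : List Int := List.replicate lengths.length fill_length
    let remainder : Int := max_length - fill_length * n
    let final := pvLoopA lengths trimmed remainder 0 ((remainder.toNat + 1) * (lengths.length + 2))
    (tokens_list.zip final).map (fun p => PySem.List.slice p.1 none (some p.2))

-- ===== PORT B =====
-- Source B's `while prefix + (n - k) * sl[k] <= max_length` scan over the sorted lengths,
-- as structural recursion on the sorted list (P is `prefix`, the suffix length is n - k);
-- returns divmod(max_length - prefix, n - k).
def pvScanB (M : Int) : List Int → Int → Int × Int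
  | [], _ => (0, 0)  -- unreachable when sum(lengths) > M (Python would raise IndexError before this)
  | x :: rs, P =>
    if P + (1 + (rs.length : Int)) * x ≤ M then pvScanB M rs (P + x)
    else
      let m : Int := 1 + (rs.length : Int)
      let t : Int := PySem.Int.floordiv (M - P) m
      (t, M - P - m * t)

-- Source B's final `for tokens in tokens_list` pass carrying the `extra` counter
def pvBuildB (tl : List (List String)) (t : Int) (extra : Int) : List (List String) :=
  match tl with
  | [] => []
  | ts :: rest =>
    if t < (ts.length : Int) ∧ 0 < extra then
      PySem.List.slice ts none (some (t + 1)) :: pvBuildB rest t (extra - 1)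
    else
      PySem.List.slice ts none (some (min (ts.length : Int) t)) :: pvBuildB rest t extra

def round_robin_trim_py_alt (tokens_list : List (List String)) (max_length : Int) : List (List String) :=
  let lengths : List Int := tokens_list.map (fun tokens => (tokens.length : Int))
  if lengths.sum ≤ max_length then tokens_list
  else
    let te := pvScanB max_length (PySem.List.sorted lengths (fun x => x) false) 0
    pvBuildB tokens_list te.1 te.2

-- ===== PRECONDITION & SPEC =====
-- Pre_ excludes only tokens_list = [] with max_length < 0, where A raises ValueError (min of empty
-- sequence); B raises ZeroDivisionError there.
def Pre_round_robin_trim_py (tokens_list : List (List String)) (max_length : Int) : Prop :=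
  tokens_list = [] → 0 ≤ max_length
instance (tokens_list : List (List String)) (max_length : Int) : Decidable (Pre_round_robin_trim_py tokens_list max_length) := by unfold Pre_round_robin_trim_py; infer_instance

def pvWitness_round_robin_trim_py : List (List String) × Int := ([["a", "b", "c"], ["d"]], 2)

def Spec_round_robin_trim_py (tokens_list : List (List String)) (max_length : Int) (out : List (List String)) : Prop := out = round_robin_trim_py_alt tokens_list max_length
instance (tokens_list : List (List String)) (max_length : Int) (out : List (List String)) : Decidable (Spec_round_robin_trim_py tokens_list max_length out) := by unfold Spec_round_robin_trim_py; infer_instance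

-- ===== CLAIM (what is proved, stated in full; the proofs are below) =====
def Claim_equal_round_robin_trim_py : Prop := ∀ (tokens_list : List (List String)) (max_length : Int), Dom_round_robin_trim_py tokens_list max_length → Pre_round_robin_trim_py tokens_list max_length → Spec_round_robin_trim_py tokens_list max_length (round_robin_trim_py tokens_list max_length)

-- ===== LEMMAS AND PROOFS =====

-- water-filling bookkeeping over the list of lengths
def pvS (ls : List Int) (u : Int) : Int := (ls.map (fun x => min x u)).sum
def pvC (ls : List Int) (u : Int) : Int := (ls.countP (fun x => decide (u < x)) : Int)
def pvc (ls : List Int) (u : Int) (i : Nat) : Int := ((ls.take i).countP (fun x => decide (u < x)) : Int)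

-- canonical trimmed vector: level u everywhere (capped by ls), +1 for the first `e` entries above u
def pvW : List Int → Int → Int → List Int
  | [], _, _ => []
  | x :: xs, u, e =>
    if u < x ∧ 0 < e then (u + 1) :: pvW xs u (e - 1)
    else (min x u) :: pvW xs u e

-- state of A's loop at head position i: entries before i already lifted to level u+1 (capped)
def pvV : List Int → Int → Nat → List Int
  | [], _, _ => []
  | x :: xs, u, 0 => min x u :: pvV xs u 0
  | x :: xs, u, i + 1 => min x (u + 1) :: pvV xs u i
-- ---- basic facts about pvS, pvC, pvc ----
lemma pvC_nonneg (ls : List Int) (u : Int) : 0 ≤ pvC ls u := Int.natCast_nonneg _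

lemma pvc_nonneg (ls : List Int) (u : Int) (i : Nat) : 0 ≤ pvc ls u i := Int.natCast_nonneg _

lemma pvc_le_pvC (ls : List Int) (u : Int) (i : Nat) : pvc ls u i ≤ pvC ls u := by
  unfold pvc pvC
  exact_mod_cast (List.take_sublist i ls).countP_le (p := fun x => decide (u < x))

lemma pvc_zero (ls : List Int) (u : Int) : pvc ls u 0 = 0 := by simp [pvc]

lemma pvc_length (ls : List Int) (u : Int) : pvc ls u ls.length = pvC ls u := by
  simp [pvc, pvC]

lemma pvc_succ (ls : List Int) (u : Int) (i : Nat) (h : i < ls.length) :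
    pvc ls u (i + 1) = pvc ls u i + (if u < ls.getD i 0 then 1 else 0) := by
  have ht : ls.take (i + 1) = ls.take i ++ [ls[i]] := by
    rw [List.take_add_one, List.getElem?_eq_getElem h]; rfl
  have hg : ls.getD i 0 = ls[i] := List.getD_eq_getElem ls 0 h
  rw [pvc, pvc, ht, List.countP_append, hg]
  by_cases hx : u < ls[i] <;> simp [hx] <;> push_cast <;> omega

lemma pvS_succ (ls : List Int) (u : Int) : pvS ls (u + 1) = pvS ls u + pvC ls u := by
  induction ls with
  | nil => simp [pvS, pvC]
  | cons x xs ih =>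
    simp only [pvS, pvC, List.map_cons, List.sum_cons, List.countP_cons] at *
    split_ifs with h <;> simp at h <;> push_cast <;> omega

lemma pvS_mono (ls : List Int) {u v : Int} (h : u ≤ v) : pvS ls u ≤ pvS ls v := by
  induction ls with
  | nil => simp [pvS]
  | cons x xs ih => simp only [pvS, List.map_cons, List.sum_cons] at *; omega

lemma pvC_pos (ls : List Int) (u : Int) (h : pvS ls u < ls.sum) : 0 < pvC ls u := by
  induction ls with
  | nil => simp [pvS] at h
  | cons x xs ih =>
    simp only [pvS, pvC, List.map_cons, List.sum_cons, List.countP_cons] at *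
    by_cases hx : u < x
    · have : (0:Int) ≤ (xs.countP (fun x => decide (u < x)) : Int) := Int.natCast_nonneg _
      simp only [hx, decide_true, if_true]
      push_cast
      omega
    · simp only [hx, decide_false, Bool.false_eq_true, if_false]
      have hx' : x ≤ u := by omega
      have hmin : min x u = x := by omega
      rw [hmin] at h
      have := ih (by omega)
      omega

-- ---- pvW lemmas ----
lemma pvW_zero (ls : List Int) (u : Int) : pvW ls u 0 = ls.map (fun x => min x u) := by
  induction ls with
  | nil => rfl
  | cons x xs ih => simp [pvW, ih]

lemma pvW_full (ls : List Int) (u : Int) : pvW ls u (pvC ls u) = pvW ls (u + 1) 0 := by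
  induction ls with
  | nil => rfl
  | cons x xs ih =>
    have hc : pvC (x :: xs) u = (if u < x then 1 else 0) + pvC xs u := by
      simp only [pvC, List.countP_cons]
      by_cases hx : u < x <;> simp [hx] <;> push_cast <;> omega
    have hnn : (0:Int) ≤ pvC xs u := pvC_nonneg _ _
    by_cases hx : u < x
    · have hpos : (0:Int) < pvC (x :: xs) u := by omega
      rw [show pvW (x :: xs) u (pvC (x :: xs) u) = (u + 1) :: pvW xs u (pvC (x :: xs) u - 1) by
        simp [pvW, hx, hpos]]
      rw [show pvC (x :: xs) u - 1 = pvC xs u by omega]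
      rw [show pvW (x :: xs) (u + 1) 0 = min x (u + 1) :: pvW xs (u + 1) 0 by simp [pvW]]
      rw [show min x (u + 1) = u + 1 by omega, ih]
    · rw [show pvW (x :: xs) u (pvC (x :: xs) u) = min x u :: pvW xs u (pvC (x :: xs) u) by
        simp [pvW, hx]]
      rw [show pvC (x :: xs) u = pvC xs u by omega]
      rw [show pvW (x :: xs) (u + 1) 0 = min x (u + 1) :: pvW xs (u + 1) 0 by simp [pvW]]
      rw [show min x (u + 1) = min x u by omega, ih]

lemma pvW_unique (ls : List Int) : ∀ (d : Nat) (u v e f : Int), (v - u).toNat = d → u ≤ v →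
    0 ≤ e → e ≤ pvC ls u → 0 ≤ f → f ≤ pvC ls v → pvS ls u + e = pvS ls v + f →
    pvW ls u e = pvW ls v f := by
  intro d
  induction d with
  | zero =>
    intro u v e f hd huv he1 he2 hf1 hf2 hsum
    have : u = v := by omega
    subst this
    have : e = f := by omega
    rw [this]
  | succ d ih =>
    intro u v e f hd huv he1 he2 hf1 hf2 hsum
    have huv' : u + 1 ≤ v := by omega
    have h1 : pvS ls (u + 1) ≤ pvS ls v := pvS_mono ls huv'
    have h2 : pvS ls (u + 1) = pvS ls u + pvC ls u := pvS_succ ls u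
    have hef : e = pvC ls u := by omega
    have hf0 : f = 0 := by omega
    have hsv : pvS ls v = pvS ls (u + 1) := by omega
    rw [hef, hf0, pvW_full]
    exact ih (u + 1) v 0 0 (by omega) huv' le_rfl (pvC_nonneg _ _) le_rfl (pvC_nonneg _ _) (by omega)
-- ---- pvV lemmas (A's loop state) ----
lemma pvV_zero (ls : List Int) (u : Int) : pvV ls u 0 = ls.map (fun x => min x u) := by
  induction ls with
  | nil => rfl
  | cons x xs ih => simp [pvV, ih]

lemma pvV_wrap (ls : List Int) (u : Int) : pvV ls u ls.length = pvV ls (u + 1) 0 := by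
  induction ls with
  | nil => rfl
  | cons x xs ih => simp [pvV, ih]

lemma pvV_getD_at (ls : List Int) (u : Int) (i : Nat) (h : i < ls.length) :
    (pvV ls u i).getD i 0 = min (ls.getD i 0) u := by
  induction ls generalizing i with
  | nil => simp at h
  | cons x xs ih =>
    cases i with
    | zero => simp [pvV]
    | succ j => simp only [pvV, List.getD_cons_succ]; exact ih j (by simpa using h)

lemma pvV_set_qual (ls : List Int) (u : Int) (i : Nat) (h : i < ls.length)
    (hq : u < ls.getD i 0) :
    (pvV ls u i).set i (min (ls.getD i 0) u + 1) = pvV ls u (i + 1) := by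
  induction ls generalizing i with
  | nil => simp at h
  | cons x xs ih =>
    cases i with
    | zero =>
      simp only [pvV, List.getD_cons_zero] at *
      rw [List.set_cons_zero]
      congr 1
      omega
    | succ j =>
      simp only [pvV, List.getD_cons_succ] at *
      rw [List.set_cons_succ]
      rw [ih j (by simpa using h) hq]

lemma pvV_idle (ls : List Int) (u : Int) (i : Nat) (h : i < ls.length)
    (hq : ls.getD i 0 ≤ u) : pvV ls u i = pvV ls u (i + 1) := by
  induction ls generalizing i with
  | nil => simp at h
  | cons x xs ih =>
    cases i with
    | zero =>
      simp only [pvV, List.getD_cons_zero] at *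
      congr 1
      omega
    | succ j =>
      simp only [pvV, List.getD_cons_succ] at *
      rw [ih j (by simpa using h) hq]

lemma pvV_eq_pvW (ls : List Int) (u : Int) (i : Nat) (h : i ≤ ls.length) :
    pvV ls u i = pvW ls u (pvc ls u i) := by
  induction ls generalizing i with
  | nil => cases i <;> rfl
  | cons x xs ih =>
    cases i with
    | zero => rw [pvc_zero, pvW_zero, pvV_zero]
    | succ j =>
      have hc : pvc (x :: xs) u (j + 1) = (if u < x then 1 else 0) + pvc xs u j := by
        simp only [pvc, List.take_succ_cons, List.countP_cons]
        by_cases hx : u < x <;> simp [hx] <;> push_cast <;> omega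
      have hnn : 0 ≤ pvc xs u j := pvc_nonneg _ _ _
      rw [hc]
      by_cases hx : u < x
      · rw [show pvW (x :: xs) u ((if u < x then 1 else 0) + pvc xs u j)
            = (u + 1) :: pvW xs u ((if u < x then 1 else 0) + pvc xs u j - 1) by
          simp [pvW, hx]; omega]
        rw [show (if u < x then (1:Int) else 0) + pvc xs u j - 1 = pvc xs u j by simp [hx]]
        simp only [pvV]
        rw [show min x (u + 1) = u + 1 by omega, ih j (by simpa using h)]
      · rw [show pvW (x :: xs) u ((if u < x then 1 else 0) + pvc xs u j)
            = min x u :: pvW xs u ((if u < x then 1 else 0) + pvc xs u j) by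
          simp [pvW, hx]]
        rw [show (if u < x then (1:Int) else 0) + pvc xs u j = pvc xs u j by simp [hx]]
        simp only [pvV]
        rw [show min x (u + 1) = min x u by omega, ih j (by simpa using h)]
-- ---- A's loop computes a water-level vector ----
lemma pvLoopA_spec : ∀ (fuel : Nat) (ls : List Int) (M u : Int) (i : Nat),
    0 < ls.length → i < ls.length → M < ls.sum →
    pvS ls u + pvc ls u i ≤ M →
    (M - pvS ls u).toNat * (ls.length + 2) + (ls.length - i) < fuel →
    ∃ u' e', 0 ≤ e' ∧ e' ≤ pvC ls u' ∧ pvS ls u' + e' = M ∧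
      pvLoopA ls (pvV ls u i) (M - (pvS ls u + pvc ls u i)) i fuel = pvW ls u' e' := by
  intro fuel
  induction fuel with
  | zero => intro ls M u i _ _ _ _ hf; omega
  | succ fuel ih =>
    intro ls M u i hn hi hM hle hf
    by_cases h0 : M - (pvS ls u + pvc ls u i) = 0
    · refine ⟨u, pvc ls u i, pvc_nonneg _ _ _, pvc_le_pvC _ _ _, by omega, ?_⟩
      rw [pvLoopA, if_pos h0, pvV_eq_pvW ls u i (le_of_lt hi)]
    · have hcnn : 0 ≤ pvc ls u i := pvc_nonneg _ _ _
      have hCnn : 0 ≤ pvC ls u := pvC_nonneg _ _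
      have hlt : pvS ls u + pvc ls u i < M := by omega
      have hSlt : pvS ls u < ls.sum := by omega
      have hCpos : 0 < pvC ls u := pvC_pos ls u hSlt
      have haux : 1 ≤ (M - pvS ls u).toNat := by omega
      have hget : (pvV ls u i).getD i 0 = min (ls.getD i 0) u := pvV_getD_at ls u i hi
      rw [pvLoopA, if_neg h0, hget]
      by_cases hq : u < ls.getD i 0
      · rw [if_pos (by omega)]
        rw [pvV_set_qual ls u i hi hq]
        have hc1 : pvc ls u (i + 1) = pvc ls u i + 1 := by rw [pvc_succ ls u i hi, if_pos hq]
        by_cases hw : i + 1 < ls.length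
        · have hmod : (i + 1) % ls.length = i + 1 := Nat.mod_eq_of_lt hw
          rw [hmod]
          obtain ⟨u', e', h1, h2, h3, h4⟩ := ih ls M u (i + 1) hn hw hM (by omega) (by omega)
          exact ⟨u', e', h1, h2, h3, by rw [← h4]; congr 1; omega⟩
        · have hieq : i + 1 = ls.length := by omega
          have hmod : (i + 1) % ls.length = 0 := by rw [hieq]; exact Nat.mod_self ls.length
          rw [hmod, hieq, pvV_wrap]
          have hS1 : pvS ls (u + 1) = pvS ls u + pvC ls u := pvS_succ ls u
          have hcn : pvc ls u ls.length = pvC ls u := pvc_length ls u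
          have hfits : pvS ls (u + 1) + pvc ls (u + 1) 0 ≤ M := by
            rw [pvc_zero]
            have : pvc ls u i + 1 = pvC ls u := by rw [← hc1, hieq, hcn]
            omega
          have hmeas : (M - pvS ls (u + 1)).toNat * (ls.length + 2) + (ls.length - 0) < fuel := by
            have hd : (M - pvS ls (u + 1)).toNat + 1 ≤ (M - pvS ls u).toNat := by omega
            have h5 : ((M - pvS ls (u + 1)).toNat + 1) * (ls.length + 2) ≤ (M - pvS ls u).toNat * (ls.length + 2) :=
              Nat.mul_le_mul_right _ hd
            have h6 : (M - pvS ls u).toNat * (ls.length + 2) < fuel := by omega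
            have h7 : (M - pvS ls (u + 1)).toNat * (ls.length + 2) + (ls.length + 2)
                = ((M - pvS ls (u + 1)).toNat + 1) * (ls.length + 2) := by ring
            omega
          obtain ⟨u', e', h1, h2, h3, h4⟩ := ih ls M (u + 1) 0 hn (by omega) hM hfits hmeas
          refine ⟨u', e', h1, h2, h3, ?_⟩
          rw [← h4]
          congr 1
          rw [pvc_zero]
          have : pvc ls u i + 1 = pvC ls u := by rw [← hc1, hieq, hcn]
          omega
      · rw [if_neg (by omega)]
        rw [pvV_idle ls u i hi (by omega)]
        have hc1 : pvc ls u (i + 1) = pvc ls u i := by rw [pvc_succ ls u i hi, if_neg hq]; omega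
        by_cases hw : i + 1 < ls.length
        · have hmod : (i + 1) % ls.length = i + 1 := Nat.mod_eq_of_lt hw
          rw [hmod]
          obtain ⟨u', e', h1, h2, h3, h4⟩ := ih ls M u (i + 1) hn hw hM (by omega) (by omega)
          exact ⟨u', e', h1, h2, h3, by rw [← h4]; congr 1; omega⟩
        · have hieq : i + 1 = ls.length := by omega
          have hmod : (i + 1) % ls.length = 0 := by rw [hieq]; exact Nat.mod_self ls.length
          rw [hmod, hieq, pvV_wrap]
          have hS1 : pvS ls (u + 1) = pvS ls u + pvC ls u := pvS_succ ls u
          have hcn : pvc ls u ls.length = pvC ls u := pvc_length ls u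
          have hceq : pvc ls u i = pvC ls u := by rw [← hc1, hieq, hcn]
          have hfits : pvS ls (u + 1) + pvc ls (u + 1) 0 ≤ M := by rw [pvc_zero]; omega
          have hmeas : (M - pvS ls (u + 1)).toNat * (ls.length + 2) + (ls.length - 0) < fuel := by
            have hd : (M - pvS ls (u + 1)).toNat + 1 ≤ (M - pvS ls u).toNat := by omega
            have h5 : ((M - pvS ls (u + 1)).toNat + 1) * (ls.length + 2) ≤ (M - pvS ls u).toNat * (ls.length + 2) :=
              Nat.mul_le_mul_right _ hd
            have h6 : (M - pvS ls u).toNat * (ls.length + 2) < fuel := by omega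
            have h7 : (M - pvS ls (u + 1)).toNat * (ls.length + 2) + (ls.length + 2)
                = ((M - pvS ls (u + 1)).toNat + 1) * (ls.length + 2) := by ring
            omega
          obtain ⟨u', e', h1, h2, h3, h4⟩ := ih ls M (u + 1) 0 hn (by omega) hM hfits hmeas
          refine ⟨u', e', h1, h2, h3, ?_⟩
          rw [← h4]
          congr 1
          rw [pvc_zero]
          omega
-- ---- B's scan over the sorted lengths finds the water level ----
lemma pvScanB_spec (M : Int) : ∀ (rest : List Int) (P lb : Int),
    (∀ y ∈ rest, lb ≤ y) → rest.Pairwise (· ≤ ·) →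
    P + (rest.length : Int) * lb ≤ M → M < P + rest.sum →
    lb ≤ (pvScanB M rest P).1 ∧ 0 ≤ (pvScanB M rest P).2 ∧
    P + (rest.map (fun y => min y (pvScanB M rest P).1)).sum + (pvScanB M rest P).2 = M ∧
    (pvScanB M rest P).2 < (rest.countP (fun y => decide ((pvScanB M rest P).1 < y)) : Int) := by
  intro rest
  induction rest with
  | nil => intro P lb _ _ h1 h2; simp at h1 h2; omega
  | cons x rs ih =>
    intro P lb hlb hpw h1 h2
    by_cases hc : P + (1 + (rs.length : Int)) * x ≤ M
    · have hx : lb ≤ x := hlb x (List.mem_cons_self)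
      have hxr : ∀ y ∈ rs, x ≤ y := by
        intro y hy; exact (List.pairwise_cons.mp hpw).1 y hy
      have h1' : (P + x) + (rs.length : Int) * x ≤ M := by
        have hexp : (1 + (rs.length:Int)) * x = x + (rs.length:Int) * x := by ring
        omega
      have h2' : M < (P + x) + rs.sum := by simp at h2; omega
      have hres : pvScanB M (x :: rs) P = pvScanB M rs (P + x) := by
        rw [pvScanB, if_pos hc]
      rw [hres]
      obtain ⟨g1, g2, g3, g4⟩ := ih (P + x) x hxr (List.pairwise_cons.mp hpw).2 h1' h2'
      refine ⟨le_trans hx g1, g2, ?_, ?_⟩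
      · have hminx : min x (pvScanB M rs (P + x)).1 = x := by omega
        simp only [List.map_cons, List.sum_cons, hminx]
        omega
      · have hnx : ¬ (pvScanB M rs (P + x)).1 < x := by omega
        simp only [List.countP_cons, hnx, decide_false]
        simpa using g4
    · have hm : (0:Int) < 1 + (rs.length : Int) := by positivity
      have hres : pvScanB M (x :: rs) P =
          (PySem.Int.floordiv (M - P) (1 + (rs.length : Int)),
           M - P - (1 + (rs.length : Int)) * PySem.Int.floordiv (M - P) (1 + (rs.length : Int))) := by
        rw [pvScanB, if_neg hc]
      set m : Int := 1 + (rs.length : Int) with hm'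
      set t : Int := PySem.Int.floordiv (M - P) m with ht'
      have hlow : t * m ≤ M - P := ((PySem.Int.le_floordiv_iff_mul_le hm).mp le_rfl)
      have hhigh : M - P < (t + 1) * m := ((PySem.Int.floordiv_lt_iff_lt_mul hm).mp (by omega))
      have hlen2 : (((x :: rs).length : Nat) : Int) = m := by rw [hm']; simp only [List.length_cons]; push_cast; ring
      rw [hlen2] at h1
      have hlbt : lb ≤ t := by
        apply (PySem.Int.le_floordiv_iff_mul_le hm).mpr
        have hcomm : lb * m = m * lb := by ring
        omega
      have htx : t < x := by
        by_contra hcon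
        push Not at hcon
        have hmx : m * x ≤ m * t := mul_le_mul_of_nonneg_left hcon (le_of_lt hm)
        have hmt : m * t = t * m := by ring
        omega
      have hall : ∀ y ∈ (x :: rs), t < y := by
        intro y hy
        rcases List.mem_cons.mp hy with rfl | hy'
        · exact htx
        · have := (List.pairwise_cons.mp hpw).1 y hy'; omega
      have hsum : ((x :: rs).map (fun y => min y t)).sum = m * t := by
        have hmc : (x :: rs).map (fun y => min y t) = (x :: rs).map (fun _ => t) :=
          List.map_congr_left (fun y hy => by have := hall y hy; omega)
        rw [hmc, List.map_const', List.sum_replicate, nsmul_eq_mul, hlen2]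
      have hcq : ∀ y ∈ (x :: rs), (fun y => decide (t < y)) y = true := by
        intro y hy
        have := hall y hy
        simpa using this
      have hcount : (((x :: rs).countP (fun y => decide (t < y)) : Nat) : Int) = m := by
        rw [List.countP_eq_length.mpr hcq, hlen2]
      have hexp2 : (t + 1) * m = m * t + m := by ring
      have hcomm2 : t * m = m * t := by ring
      rw [hres]
      refine ⟨hlbt, ?_, ?_, ?_⟩
      · show (0:Int) ≤ M - P - m * t
        omega
      · show P + ((x :: rs).map (fun y => min y t)).sum + (M - P - m * t) = M
        rw [hsum]; ring
      · show M - P - m * t < (((x :: rs).countP (fun y => decide (t < y)) : Nat) : Int)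
        rw [hcount]; omega
-- ---- Source B's output pass builds the slices of the water-level vector ----
lemma pvBuildB_eq (tl : List (List String)) (t : Int) : ∀ e : Int,
    pvBuildB tl t e =
      ((tl.zip (pvW (tl.map (fun ts => (ts.length : Int))) t e)).map
        (fun p => PySem.List.slice p.1 none (some p.2))) := by
  induction tl with
  | nil => intro e; rfl
  | cons ts rest ih =>
    intro e
    by_cases hc : t < (ts.length : Int) ∧ 0 < e
    · rw [pvBuildB, if_pos hc]
      rw [show (ts :: rest).map (fun ts => (ts.length : Int))
          = (ts.length : Int) :: rest.map (fun ts => (ts.length : Int)) from List.map_cons ..]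
      rw [show pvW ((ts.length : Int) :: rest.map (fun ts => (ts.length : Int))) t e
          = (t + 1) :: pvW (rest.map (fun ts => (ts.length : Int))) t (e - 1) by
        simp [pvW, hc.1, hc.2]]
      rw [List.zip_cons_cons, List.map_cons, ih (e - 1)]
    · rw [pvBuildB, if_neg hc]
      rw [show (ts :: rest).map (fun ts => (ts.length : Int))
          = (ts.length : Int) :: rest.map (fun ts => (ts.length : Int)) from List.map_cons ..]
      rw [show pvW ((ts.length : Int) :: rest.map (fun ts => (ts.length : Int))) t e
          = min (ts.length : Int) t :: pvW (rest.map (fun ts => (ts.length : Int))) t e by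
        simp only [pvW, if_neg hc]]
      rw [List.zip_cons_cons, List.map_cons, ih e]

-- ===== VERDICT (by name: the statement is the Claim_ definition above) =====
theorem round_robin_trim_py_spec : Claim_equal_round_robin_trim_py := by
  unfold Claim_equal_round_robin_trim_py
  intro tl M hdom hpre
  unfold Spec_round_robin_trim_py round_robin_trim_py round_robin_trim_py_alt
  by_cases hsum : (tl.map (fun tokens => (tokens.length : Int))).sum ≤ M
  · rw [if_pos hsum, if_pos hsum]
  · rw [if_neg hsum, if_neg hsum]
    set ls := tl.map (fun tokens => (tokens.length : Int)) with hls
    -- shared facts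
    have hnil : tl ≠ [] := by
      intro h
      subst h
      simp [hls] at hsum
      have := hpre rfl
      omega
    have hlsne : ls ≠ [] := by
      simp only [hls, ne_eq, List.map_eq_nil_iff]
      exact hnil
    have hn : 0 < ls.length := List.length_pos_iff.mpr hlsne
    have hM : M < ls.sum := by omega
    obtain ⟨m0, hm0⟩ : ∃ m0, PySem.List.min? ls (fun x => x) = some m0 := by
      cases h : PySem.List.min? ls (fun x => x) with
      | none => exact absurd ((PySem.List.min?_eq_none_iff ls (fun x => x)).mp h) hlsne
      | some m0 => exact ⟨m0, rfl⟩
    have hmin : ∀ y ∈ ls, m0 ≤ y := PySem.List.min?_isMin hm0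
    rw [hm0]
    simp only [Option.getD_some]
    set nI : Int := (ls.length : Int) with hnI'
    have hnI : 0 < nI := by simp [hnI']; omega
    set fill : Int := min m0 (PySem.Int.floordiv M nI) with hfill'
    -- A-side setup
    have hfl : ∀ y ∈ ls, fill ≤ y := fun y hy => le_trans (min_le_left _ _) (hmin y hy)
    have hfM : fill * nI ≤ M := by
      have h1 : fill ≤ PySem.Int.floordiv M nI := min_le_right _ _
      have h2 : PySem.Int.floordiv M nI * nI ≤ M :=
        (PySem.Int.le_floordiv_iff_mul_le hnI).mp le_rfl
      have h3 : fill * nI ≤ PySem.Int.floordiv M nI * nI :=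
        mul_le_mul_of_nonneg_right h1 (le_of_lt hnI)
      omega
    have hmapc : ls.map (fun x => min x fill) = ls.map (fun _ => fill) :=
      List.map_congr_left (fun y hy => by have := hfl y hy; omega)
    have hrep : List.replicate ls.length fill = pvV ls fill 0 := by
      rw [pvV_zero, hmapc, List.map_const']
    have hSfill : pvS ls fill = fill * nI := by
      rw [pvS, hmapc, List.map_const', List.sum_replicate, nsmul_eq_mul, hnI']
      ring
    have hle0 : pvS ls fill + pvc ls fill 0 ≤ M := by rw [pvc_zero]; omega
    have hmeas : (M - pvS ls fill).toNat * (ls.length + 2) + (ls.length - 0)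
        < ((M - fill * nI).toNat + 1) * (ls.length + 2) := by
      rw [hSfill]
      have hexp : ((M - fill * nI).toNat + 1) * (ls.length + 2)
          = (M - fill * nI).toNat * (ls.length + 2) + (ls.length + 2) := by ring
      omega
    obtain ⟨u', e', hu1, hu2, hu3, hu4⟩ :=
      pvLoopA_spec (((M - fill * nI).toNat + 1) * (ls.length + 2)) ls M fill 0 hn hn hM hle0 hmeas
    rw [pvc_zero] at hu4
    rw [hSfill] at hu4
    rw [show M - (fill * nI + 0) = M - fill * nI from by ring] at hu4
    -- B-side setup
    set sl := PySem.List.sorted ls (fun x => x) false with hsl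
    have hperm : sl.Perm ls := PySem.List.sorted_perm ls (fun x => x) false
    have hpw : sl.Pairwise (· ≤ ·) := PySem.List.sorted_pairwise ls (fun x => x)
    have hlb : ∀ y ∈ sl, fill ≤ y := fun y hy => hfl y (hperm.mem_iff.mp hy)
    have hlen : sl.length = ls.length := hperm.length_eq
    have hsc1 : (0:Int) + (sl.length : Int) * fill ≤ M := by
      rw [hlen, ← hnI']
      have : nI * fill = fill * nI := by ring
      omega
    have hsc2 : M < (0:Int) + sl.sum := by
      rw [hperm.sum_eq]
      omega
    obtain ⟨g1, g2, g3, g4⟩ := pvScanB_spec M sl 0 fill hlb hpw hsc1 hsc2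
    set t : Int := (pvScanB M sl 0).1 with ht'
    set e : Int := (pvScanB M sl 0).2 with he'
    have hmapS : (sl.map (fun y => min y t)).sum = pvS ls t := (hperm.map _).sum_eq
    have hcntS : (sl.countP (fun y => decide (t < y)) : Int) = pvC ls t := by
      rw [pvC, hperm.countP_eq]
    have hg3 : pvS ls t + e = M := by rw [← hmapS]; omega
    have hg4 : e < pvC ls t := by rw [← hcntS]; exact g4
    -- the two water-level vectors coincide
    have hWeq : pvW ls u' e' = pvW ls t e := by
      rcases le_total u' t with h | h
      · exact pvW_unique ls ((t - u').toNat) u' t e' e rfl h hu1 hu2 g2 (le_of_lt hg4) (by omega)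
      · exact (pvW_unique ls ((u' - t).toNat) t u' e e' rfl h g2 (le_of_lt hg4) hu1 hu2 (by omega)).symm
    -- assemble
    rw [pvBuildB_eq tl t e, ← hls, ← hWeq, ← hu4, hrep]
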